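-- pv_equiv track=rewrite | github.com/scarletfantasy/renderdoc-mcp | src/renderdoc_mcp/analysis/pass_classification.py | _collect_resource_names
-- ===== SOURCE A (Python) =====
-- def _collect_resource_names(items):
--     names = []
--     for item in items:
--         name = (item or {}).get("resource_name") or ""
--         if name and name not in names:
--             names.append(name)
--         if len(names) >= 4:
--             break
--     return names
-- ===== SOURCE B (Python) =====
-- def _collect_resource_names(items):
--     raw = ((item or {}).get("resource_name") or "" for item in items)
--     return list(dict.fromkeys(n for n in raw if n))[:4]
-- ===== Notes on version B (the rewrite author's own statement) =====
-- stated objective: idiomatic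
-- what changed: Replaced the early-breaking accumulator loop with a build-then-slice pipeline: map every item to its name, filter out falsy ones, dedup in first-occurrence order via dict.fromkeys, and take the first 4.
import Mathlib
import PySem

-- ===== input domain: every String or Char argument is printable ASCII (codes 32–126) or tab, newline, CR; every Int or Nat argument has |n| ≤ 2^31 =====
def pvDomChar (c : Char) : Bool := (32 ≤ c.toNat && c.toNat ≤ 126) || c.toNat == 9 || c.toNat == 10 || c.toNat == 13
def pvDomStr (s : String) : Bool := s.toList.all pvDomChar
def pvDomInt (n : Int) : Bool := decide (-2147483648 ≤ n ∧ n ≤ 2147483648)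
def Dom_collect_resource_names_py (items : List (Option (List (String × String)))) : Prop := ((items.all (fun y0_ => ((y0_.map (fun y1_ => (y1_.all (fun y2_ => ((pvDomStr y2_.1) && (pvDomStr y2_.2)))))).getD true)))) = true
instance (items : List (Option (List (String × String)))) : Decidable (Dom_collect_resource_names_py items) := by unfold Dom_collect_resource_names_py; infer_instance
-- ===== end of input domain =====

-- B is the idiomatic build-then-slice pipeline (map, filter truthy, dedup in first-occurrence
-- order, take 4) replacing A's early-breaking accumulator loop; return values proved equal.
-- ===== PORT A =====
def collectLoop (items : List (Option (List (String × String)))) (names : List String) : List String :=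
  match items with
  | [] => names
  | item :: rest =>
    let name := PySem.Dict.getD (PySem.Dict.mk (item.getD [])) "resource_name" ""
    let names' := if name ≠ "" ∧ name ∉ names then names ++ [name] else names
    if 4 ≤ names'.length then names' else collectLoop rest names'

def collect_resource_names_py (items : List (Option (List (String × String)))) : List String :=
  collectLoop items []

-- ===== PORT B =====
def collect_resource_names_py_alt (items : List (Option (List (String × String)))) : List String :=
  let raw := items.map (fun item => PySem.Dict.getD (PySem.Dict.mk (item.getD [])) "resource_name" "")
  (PySem.List.dedup (raw.filter (fun n => n != ""))).take 4

-- ===== PRECONDITION & SPEC =====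
def Spec_collect_resource_names_py (items : List (Option (List (String × String)))) (out : List String) : Prop := out = collect_resource_names_py_alt items
instance (items : List (Option (List (String × String)))) (out : List String) : Decidable (Spec_collect_resource_names_py items out) := by unfold Spec_collect_resource_names_py; infer_instance

-- ===== CLAIM (what is proved, stated in full; the proofs are below) =====
def Claim_equal_collect_resource_names_py : Prop := ∀ (items : List (Option (List (String × String)))), Dom_collect_resource_names_py items → Spec_collect_resource_names_py items (collect_resource_names_py items)

-- ===== LEMMAS AND PROOFS =====

-- first-occurrence dedup relative to an already-seen prefix
def dedupF (seen : List String) : List String → List String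
  | [] => []
  | n :: r => if n ∈ seen then dedupF seen r else n :: dedupF (seen ++ [n]) r

theorem foldl_add_eq_dedupF (ns : List String) : ∀ (seen : List String),
    ns.foldl PySem.Set.add seen = seen ++ dedupF seen ns := by
  induction ns with
  | nil => intro seen; simp [dedupF]
  | cons n r ih =>
    intro seen
    by_cases h : n ∈ seen
    · simp [dedupF, h, PySem.Set.add, PySem.Set.contains, ih]
    · simp [dedupF, h, PySem.Set.add, PySem.Set.contains, ih]

def namesOf (items : List (Option (List (String × String)))) : List String :=
  (items.map (fun item => PySem.Dict.getD (PySem.Dict.mk (item.getD [])) "resource_name" "")).filter (fun n => n != "")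

theorem collectLoop_eq (items : List (Option (List (String × String)))) :
    ∀ (acc : List String), acc.length < 4 →
    collectLoop items acc = (acc ++ dedupF acc (namesOf items)).take 4 := by
  induction items with
  | nil =>
    intro acc h
    simp [collectLoop, namesOf, dedupF, List.take_of_length_le (Nat.le_of_lt h)]
  | cons item rest ih =>
    intro acc h
    rw [collectLoop]
    have hns : namesOf (item :: rest)
        = if (PySem.Dict.getD (PySem.Dict.mk (item.getD [])) "resource_name" "") ≠ "" then
            (PySem.Dict.getD (PySem.Dict.mk (item.getD [])) "resource_name" "") :: namesOf rest
          else namesOf rest := by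
      simp only [namesOf, List.map_cons, List.filter_cons]
      split_ifs with h1 h2 h3 <;> simp_all
    set name := PySem.Dict.getD (PySem.Dict.mk (item.getD [])) "resource_name" "" with hname
    by_cases he : name = ""
    · simp only [he, ne_eq, not_true_eq_false, false_and, if_false, if_neg (by omega : ¬ 4 ≤ acc.length)]
      rw [ih acc h, hns]; simp [he]
    · by_cases hm : name ∈ acc
      · simp only [ne_eq, he, not_false_eq_true, hm, not_true_eq_false, and_false, if_false,
          if_neg (by omega : ¬ 4 ≤ acc.length)]
        rw [ih acc h, hns]
        simp [he, dedupF, hm]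
      · simp only [ne_eq, he, not_false_eq_true, hm, not_false_eq_true, and_self, if_true]
        rw [hns]; simp only [he, ne_eq, not_false_eq_true, if_true, dedupF]
        rw [if_neg hm]
        by_cases hlen : 4 ≤ (acc ++ [name]).length
        · rw [if_pos hlen]
          have h4 : (acc ++ [name]).length = 4 := by simp at hlen ⊢; omega
          have : acc ++ name :: dedupF (acc ++ [name]) (namesOf rest)
              = (acc ++ [name]) ++ dedupF (acc ++ [name]) (namesOf rest) := by simp
          rw [this, ← h4, List.take_left]
        · rw [if_neg hlen]
          rw [ih (acc ++ [name]) (by simpa using Nat.lt_of_not_le (by simpa using hlen))]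
          simp

theorem alt_eq (items : List (Option (List (String × String)))) :
    collect_resource_names_py_alt items = (dedupF [] (namesOf items)).take 4 := by
  simp only [collect_resource_names_py_alt, namesOf, PySem.List.dedup_eq_ofList,
    PySem.Set.ofList_eq_foldl, foldl_add_eq_dedupF, List.nil_append]

-- ===== VERDICT (by name: the statement is the Claim_ definition above) =====
theorem collect_resource_names_py_spec : Claim_equal_collect_resource_names_py := by
  intro items _
  unfold Spec_collect_resource_names_py collect_resource_names_py
  rw [collectLoop_eq items [] (by decide), alt_eq]
  simp
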